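-- pv_equiv track=rewrite | github.com/knthmn/advent-of-code-2025 | d06/solution.py | part_1
-- ===== SOURCE A (Python) =====
-- from functools import reduce
--
-- def part_1(lines: list[str]):
--     problems = [[s for s in line.split()] for line in lines]
--     problems = [i for i in zip(*problems)]
--
--     total = 0
--     for problem in problems:
--         numbers = [int(s) for s in problem[:-1]]
--         if problem[-1] == "+":
--             total += sum(numbers)
--         else:
--             total += reduce(lambda x, y: x * y, numbers)
--     return total
-- ===== SOURCE B (Python) =====
-- def part_1(lines: list[str]):
--     tokens = [line.split() for line in lines]
--     if not tokens:
--         return 0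
--     ops = tokens[-1]
--     rows = tokens[:-1]
--     m = min(len(t) for t in tokens)
--     sums = [0] * m
--     prods = [1] * m
--     for row in rows:
--         vals = [int(s) for s in row[:m]]
--         sums = [a + v for a, v in zip(sums, vals)]
--         prods = [a * v for a, v in zip(prods, vals)]
--     total = 0
--     for op, s, p in zip(ops, sums, prods):
--         total += s if op == "+" else p
--     return total
-- ===== Notes on version B (the rewrite author's own statement) =====
-- stated objective: alternative
-- what changed: A transposes the token table with zip(*...) and then reduces each column separately (sum or functools.reduce product); B never transposes: it makes a single row-wise pass maintaining per-column running sums and products and combines them with the operator row at the end.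
-- outside the precondition, e.g. on part_1(['* +']): A raises TypeError, B returns 1; on part_1(['x', '1']): A raises ValueError, B raises ValueError
import Mathlib
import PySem

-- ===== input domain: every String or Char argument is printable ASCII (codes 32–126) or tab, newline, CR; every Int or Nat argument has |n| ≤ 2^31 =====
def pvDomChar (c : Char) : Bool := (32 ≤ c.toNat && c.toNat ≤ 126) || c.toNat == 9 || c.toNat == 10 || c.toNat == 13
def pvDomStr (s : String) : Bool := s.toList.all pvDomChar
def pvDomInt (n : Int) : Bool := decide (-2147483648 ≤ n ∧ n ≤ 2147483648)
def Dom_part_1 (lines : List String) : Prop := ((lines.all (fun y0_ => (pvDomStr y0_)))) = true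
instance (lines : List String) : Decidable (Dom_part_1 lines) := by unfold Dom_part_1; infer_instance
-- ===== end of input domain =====

-- B replaces A's transpose-then-reduce-per-column by a single row-wise pass that keeps
-- per-column running sums and products (alternative decomposition, same cost).

-- ===== PORT A =====
-- zip(*problems): truncating transpose, exactly Python's zip semantics
def pyZipStar (ts : List (List String)) : List (List String) :=
  if ts.isEmpty || ts.any (·.isEmpty) then []
  else (ts.map (fun t => t.headI)) :: pyZipStar (ts.map List.tail)
termination_by ts.headI.length
decreasing_by
  rename_i h
  cases ts with
  | nil => simp at h
  | cons x r =>
    simp only [List.isEmpty_cons, List.any_cons, Bool.false_or, Bool.or_eq_true,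
      List.any_eq_true, List.isEmpty_iff] at h
    push_neg at h
    simp only [List.map_cons, List.headI_cons]
    have hx : x ≠ [] := h.1
    cases x with
    | nil => exact absurd rfl hx
    | cons a t => simp

-- the body of A's 'for problem in problems' loop (exception = none)
def stepA (acc : Option Int) (problem : List String) : Option Int :=
  match acc with
  | none => none
  | some total =>
    match (PySem.List.slice problem none (some (-1))).mapM PySem.Int.ofStr? with
    | none => none          -- int(s) raised ValueError
    | some numbers =>
      match PySem.List.pyGet? problem (-1) with
      | none => none        -- IndexError (unreachable for zip columns)
      | some op =>
        if op = "+" then some (total + numbers.sum)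
        else
          match numbers with
          | [] => none      -- reduce() of empty sequence: TypeError
          | x :: rest => some (total + rest.foldl (· * ·) x)

def part_1 (lines : List String) : Int :=
  ((pyZipStar (lines.map (fun line => PySem.Str.split₀ line))).foldl stepA (some 0)).getD 0

-- ===== PORT B =====
-- the body of B's 'for row in rows' loop (exception = none)
def stepB (m : Nat) (st : Option (List Int × List Int)) (row : List String) :
    Option (List Int × List Int) :=
  match st with
  | none => none
  | some (sums, prods) =>
    match (row.take m).mapM PySem.Int.ofStr? with
    | none => none          -- int(s) raised ValueError
    | some vals =>
      some (sums.zipWith (· + ·) vals, prods.zipWith (· * ·) vals)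

def part_1_alt (lines : List String) : Int :=
  let tokens := lines.map (fun line => PySem.Str.split₀ line)
  if tokens.isEmpty then 0
  else
    let ops := tokens.getLastD []
    let rows := tokens.dropLast
    let m := (PySem.List.min? (tokens.map List.length) (fun x => x)).getD 0
    match rows.foldl (stepB m) (some (List.replicate m 0, List.replicate m 1)) with
    | none => 0
    | some (sums, prods) =>
      (ops.zip (sums.zip prods)).foldl
        (fun total osp => total + (if osp.1 = "+" then osp.2.1 else osp.2.2)) 0

-- ===== PRECONDITION & SPEC =====
-- Pre_ excludes exactly the inputs where A raises: a non-int token in a used column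
-- (ValueError) or a used non-'+' operator column with no number rows (TypeError in reduce).
def Pre_part_1 (lines : List String) : Prop :=
  ∀ j < ((((lines.map PySem.Str.split₀).map List.length).min?).getD 0),
    (∀ row ∈ (lines.map PySem.Str.split₀).dropLast,
        PySem.Int.ofStr? (row.getD j "") ≠ none) ∧
    (((lines.map PySem.Str.split₀).getLastD []).getD j "" ≠ "+" → 2 ≤ lines.length)
instance (lines : List String) : Decidable (Pre_part_1 lines) := by
  unfold Pre_part_1; infer_instance

def pvWitness_part_1 : List String := ["1 2 3", "4 5 6", "+ *"]

def Spec_part_1 (lines : List String) (out : Int) : Prop := out = part_1_alt lines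
instance (lines : List String) (out : Int) : Decidable (Spec_part_1 lines out) := by
  unfold Spec_part_1; infer_instance

-- ===== CLAIM (what is proved, stated in full; the proofs are below) =====
def Claim_equal_part_1 : Prop :=
  ∀ (lines : List String), Dom_part_1 lines → Pre_part_1 lines →
    Spec_part_1 lines (part_1 lines)
-- ===== LEMMAS AND PROOFS =====

-- int(s) when it succeeds, as a total function
def pvParse (s : String) : Int := (PySem.Int.ofStr? s).getD 0
-- number of columns zip keeps: the minimum token count over all lines
def mL (ts : List (List String)) : Nat := ((ts.map List.length).min?).getD 0
-- value A adds for column j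
def gcol (rs : List (List String)) (ops : List String) (j : Nat) : Int :=
  if ops.getD j "" = "+" then (rs.map (fun r => pvParse (r.getD j ""))).sum
  else (rs.map (fun r => pvParse (r.getD j ""))).foldl (· * ·) 1
-- B's pure row step, once parsing is known to succeed
def pstep (m : Nat) (sp : List Int × List Int) (row : List String) : List Int × List Int :=
  ((sp.1.zipWith (· + ·) ((row.take m).map pvParse)),
   (sp.2.zipWith (· * ·) ((row.take m).map pvParse)))

theorem foldl_min_sub (l : List Nat) (a : Nat) :
    (l.map (fun x => x - 1)).foldl min (a - 1) = l.foldl min a - 1 := by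
  induction l generalizing a with
  | nil => rfl
  | cons x t ih =>
    simp only [List.map_cons, List.foldl_cons]
    rw [show min (a - 1) (x - 1) = min a x - 1 by omega]
    exact ih _

theorem mL_tail (ts : List (List String)) (h : ts ≠ []) :
    mL (ts.map List.tail) = mL ts - 1 := by
  cases ts with
  | nil => exact absurd rfl h
  | cons x r =>
    simp only [mL, List.map_cons, List.map_map, List.min?_cons']
    have : (List.map (List.length ∘ List.tail) r) = (r.map List.length).map (fun x => x - 1) := by
      simp [List.map_map, Function.comp_def, List.length_tail]
    rw [this, Option.getD_some, Option.getD_some, List.length_tail, foldl_min_sub]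

theorem mL_le (ts : List (List String)) (t : List String) (h : t ∈ ts) :
    mL ts ≤ t.length := by
  cases ts with
  | nil => simp at h
  | cons x r =>
    have hv : ((x :: r).map List.length).min? = some ((r.map List.length).foldl min x.length) := by
      rw [List.map_cons, List.min?_cons']
    rw [mL, hv, Option.getD_some]
    exact (List.min?_eq_some_iff.mp hv).2 _ (List.mem_map_of_mem h)

theorem mL_pos (ts : List (List String)) (h : ts ≠ []) (h2 : ∀ t ∈ ts, t ≠ []) :
    0 < mL ts := by
  cases ts with
  | nil => exact absurd rfl h
  | cons x r =>
    have hv : ((x :: r).map List.length).min? = some ((r.map List.length).foldl min x.length) := by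
      rw [List.map_cons, List.min?_cons']
    rw [mL, hv, Option.getD_some]
    obtain ⟨t, ht, hvt⟩ := List.mem_map.mp (List.min?_eq_some_iff.mp hv).1
    rw [← hvt]
    have := h2 t ht
    cases t with
    | nil => exact absurd rfl this
    | cons a b => simp

theorem headI_eq_getD_zero (t : List String) (h : t ≠ []) : t.headI = t.getD 0 "" := by
  cases t with
  | nil => exact absurd rfl h
  | cons a b => rfl

theorem tail_getD (t : List String) (j : Nat) (h : t ≠ []) :
    t.tail.getD j "" = t.getD (j + 1) "" := by
  cases t with
  | nil => exact absurd rfl h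
  | cons a b => rfl

theorem pyZipStar_eq (ts : List (List String)) :
    pyZipStar ts = (List.range (mL ts)).map (fun j => ts.map (fun t => t.getD j "")) := by
  rw [pyZipStar]
  split_ifs with h
  · have hm : mL ts = 0 := by
      rcases (Bool.or_eq_true _ _).mp h with h1 | h2
      · have : ts = [] := List.isEmpty_iff.mp h1
        subst this; rfl
      · obtain ⟨t, ht, he⟩ := List.any_eq_true.mp h2
        have h0 : t.length = 0 := by
          simpa [List.isEmpty_iff, List.length_eq_zero_iff] using he
        have := mL_le ts t ht; omega
    rw [hm]; rfl
  · have hcond : ts ≠ [] ∧ ∀ t ∈ ts, t ≠ [] := by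
      simp only [Bool.or_eq_true, List.any_eq_true, List.isEmpty_iff] at h
      push_neg at h
      exact ⟨h.1, fun t ht => by
        intro hnil
        exact (h.2 t ht) (by simp [hnil])⟩
    have hpos := mL_pos ts hcond.1 hcond.2
    have htail := mL_tail ts hcond.1
    rw [pyZipStar_eq (ts.map List.tail), htail]
    have hm : mL ts = (mL ts - 1) + 1 := by omega
    conv_rhs => rw [hm]
    rw [List.range_succ_eq_map]
    simp only [List.map_cons, List.map_map]
    congr 1
    · exact List.map_congr_left (fun t ht => headI_eq_getD_zero t (hcond.2 t ht))
    · apply List.map_congr_left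
      intro j _
      simp only [Function.comp_def, List.map_map]
      exact List.map_congr_left (fun t ht => tail_getD t j (hcond.2 t ht))
termination_by ts.headI.length
decreasing_by
  cases ts with
  | nil => simp at h
  | cons x r =>
    simp only [List.isEmpty_cons, List.any_cons, Bool.false_or, Bool.or_eq_true,
      List.any_eq_true, List.isEmpty_iff] at h
    push_neg at h
    simp only [List.map_cons, List.headI_cons]
    have hx : x ≠ [] := h.1
    cases x with
    | nil => exact absurd rfl hx
    | cons a t => simp

theorem mapM_ofStr?_eq_some (l : List String)
    (h : ∀ s ∈ l, PySem.Int.ofStr? s ≠ none) :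
    l.mapM PySem.Int.ofStr? = some (l.map pvParse) := by
  induction l with
  | nil => rfl
  | cons x t ih =>
    have hx := h x (by simp)
    cases hov : PySem.Int.ofStr? x with
    | none => exact absurd hov hx
    | some v =>
      rw [List.mapM_cons, hov, ih (fun s hs => h s (by simp [hs]))]
      simp [pvParse, hov]

theorem foldl_stepA' (l : List Nat) (colf : Nat → List String) (g : Nat → Int)
    (h : ∀ j ∈ l, ∀ t : Int, stepA (some t) (colf j) = some (t + g j)) (t0 : Int) :
    l.foldl (fun acc j => stepA acc (colf j)) (some t0) = some (t0 + (l.map g).sum) := by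
  induction l generalizing t0 with
  | nil => simp
  | cons j r ih =>
    simp only [List.foldl_cons, h j (by simp) t0, List.map_cons, List.sum_cons]
    rw [ih (fun j hj => h j (by simp [hj]))]
    congr 1; ring

theorem stepA_col (rs : List (List String)) (ops : List String) (j : Nat)
    (hparse : ∀ r ∈ rs, PySem.Int.ofStr? (r.getD j "") ≠ none)
    (hnp : ops.getD j "" ≠ "+" → rs ≠ []) (t : Int) :
    stepA (some t) (rs.map (fun r => r.getD j "") ++ [ops.getD j ""]) =
      some (t + gcol rs ops j) := by
  have hslice : PySem.List.slice (rs.map (fun r => r.getD j "") ++ [ops.getD j ""])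
      none (some (-1)) = rs.map (fun r => r.getD j "") := by
    rw [PySem.List.slice_to_neg_one, List.dropLast_concat]
  have hmapM : (rs.map (fun r => r.getD j "")).mapM PySem.Int.ofStr? =
      some ((rs.map (fun r => r.getD j "")).map pvParse) := by
    refine mapM_ofStr?_eq_some _ ?_
    intro s hs
    obtain ⟨r, hr, rfl⟩ := List.mem_map.mp hs
    exact hparse r hr
  have hlast : PySem.List.pyGet? (rs.map (fun r => r.getD j "") ++ [ops.getD j ""]) (-1) =
      some (ops.getD j "") := by
    rw [PySem.List.pyGet?_neg_one, List.getLast?_concat]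
  simp only [stepA, hslice, hmapM, hlast]
  by_cases hop : ops.getD j "" = "+"
  · rw [if_pos hop, gcol, if_pos hop]
    simp [List.map_map, Function.comp_def]
  · rw [if_neg hop]
    have hrs := hnp hop
    obtain ⟨r0, rtl, rfl⟩ := List.exists_cons_of_ne_nil hrs
    rw [gcol, if_neg hop]
    simp only [List.map_cons, List.foldl_cons, one_mul, List.foldl_map,
      List.map_map, Function.comp_def]

theorem foldl_stepB_some (m : Nat) (rows : List (List String))
    (h : ∀ r ∈ rows, ∀ s ∈ r.take m, PySem.Int.ofStr? s ≠ none)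
    (sp : List Int × List Int) :
    rows.foldl (stepB m) (some sp) = some (rows.foldl (pstep m) sp) := by
  induction rows generalizing sp with
  | nil => rfl
  | cons r t ih =>
    simp only [List.foldl_cons]
    rw [show stepB m (some sp) r = some (pstep m sp r) by
      cases sp with
      | mk s p =>
        simp only [stepB, mapM_ofStr?_eq_some _ (h r (by simp)), pstep]]
    exact ih (fun r hr => h r (by simp [hr])) (pstep m sp r)

theorem getD_zipWith (f : Int → Int → Int) (s v : List Int) (j : Nat)
    (h1 : j < s.length) (h2 : j < v.length) :
    (s.zipWith f v).getD j 0 = f (s.getD j 0) (v.getD j 0) := by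
  rw [List.getD_eq_getElem _ _ (by simp; omega), List.getD_eq_getElem _ _ h1,
    List.getD_eq_getElem _ _ h2, List.getElem_zipWith]

theorem getD_vals (r : List String) (m j : Nat) (hj : j < m) (hm : m ≤ r.length) :
    ((r.take m).map pvParse).getD j 0 = pvParse (r.getD j "") := by
  rw [List.getD_eq_getElem _ _ (by simp; omega), List.getElem_map,
    List.getElem_take, List.getD_eq_getElem _ _ (by omega)]

theorem pstep_fold_len (m : Nat) (rows : List (List String)) (sp : List Int × List Int)
    (h1 : sp.1.length = m) (h2 : sp.2.length = m) (hr : ∀ r ∈ rows, m ≤ r.length) :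
    (rows.foldl (pstep m) sp).1.length = m ∧ (rows.foldl (pstep m) sp).2.length = m := by
  induction rows generalizing sp with
  | nil => exact ⟨h1, h2⟩
  | cons r t ih =>
    have hrm : m ≤ r.length := hr r (by simp)
    refine ih (pstep m sp r) ?_ ?_ (fun r hr' => hr r (by simp [hr']))
    · simp [pstep, h1, List.length_take]; omega
    · simp [pstep, h2, List.length_take]; omega

theorem pstep_fold_getD (m : Nat) (rows : List (List String)) (j : Nat) (hj : j < m)
    (sp : List Int × List Int) (h1 : sp.1.length = m) (h2 : sp.2.length = m)
    (hr : ∀ r ∈ rows, m ≤ r.length) :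
    (rows.foldl (pstep m) sp).1.getD j 0 =
      rows.foldl (fun a r => a + pvParse (r.getD j "")) (sp.1.getD j 0) ∧
    (rows.foldl (pstep m) sp).2.getD j 0 =
      rows.foldl (fun a r => a * pvParse (r.getD j "")) (sp.2.getD j 0) := by
  induction rows generalizing sp with
  | nil => exact ⟨rfl, rfl⟩
  | cons r t ih =>
    have hrm : m ≤ r.length := hr r (by simp)
    have hlen : (List.map pvParse (List.take m r)).length = m := by
      simp [List.length_take]; omega
    have hs : (pstep m sp r).1.length = m := by
      simp [pstep, h1, List.length_take]; omega
    have hp : (pstep m sp r).2.length = m := by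
      simp [pstep, h2, List.length_take]; omega
    have := ih (pstep m sp r) hs hp (fun r hr' => hr r (by simp [hr']))
    simp only [List.foldl_cons]
    rw [this.1, this.2]
    constructor
    · congr 1
      rw [show (pstep m sp r).1 = sp.1.zipWith (· + ·) ((r.take m).map pvParse) from rfl,
        getD_zipWith _ _ _ _ (by omega) (by omega), getD_vals r m j hj hrm]
    · congr 1
      rw [show (pstep m sp r).2 = sp.2.zipWith (· * ·) ((r.take m).map pvParse) from rfl,
        getD_zipWith _ _ _ _ (by omega) (by omega), getD_vals r m j hj hrm]

theorem zip3_eq (m : Nat) (ops : List String) (sums prods : List Int)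
    (hs : sums.length = m) (hp : prods.length = m) (ho : m ≤ ops.length) :
    ops.zip (sums.zip prods) =
      (List.range m).map (fun j => (ops.getD j "", (sums.getD j 0, prods.getD j 0))) := by
  apply List.ext_getElem
  · simp; omega
  · intro j h1 h2
    simp only [List.getElem_zip, List.getElem_map, List.getElem_range]
    have hj : j < m := by simpa using h2
    rw [List.getD_eq_getElem _ _ (by omega), List.getD_eq_getElem _ _ (by omega),
      List.getD_eq_getElem _ _ (by omega)]

theorem foldl_add_pick {α : Type} (l : List α) (pick : α → Int) :
    l.foldl (fun t x => t + pick x) 0 = (l.map pick).sum := by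
  rw [List.sum_eq_foldl, List.foldl_map]

theorem min?_id_bridge (x : Nat) (r : List Nat) :
    (PySem.List.min? (x :: r) (fun y => y)).getD 0 = ((x :: r).min?).getD 0 := by
  rw [PySem.List.min?_id_cons, List.min?_cons']

theorem main_eq (lines : List String) (hp : Pre_part_1 lines) :
    part_1 lines = part_1_alt lines := by
  unfold part_1 part_1_alt
  unfold Pre_part_1 at hp
  cases hts : lines.map (fun line => PySem.Str.split₀ line) with
  | nil => simp [pyZipStar]
  | cons t0 rest =>
    have hts' : lines.map PySem.Str.split₀ = t0 :: rest := hts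
    rw [hts'] at hp
    obtain ⟨rs, ops, hsplit⟩ : ∃ rs ops, t0 :: rest = rs ++ [ops] := by
      rcases List.eq_nil_or_concat (t0 :: rest) with h | ⟨ys, y, h⟩
      · simp at h
      · exact ⟨ys, y, by simpa using h⟩
    have hdrop : (t0 :: rest).dropLast = rs := by rw [hsplit, List.dropLast_concat]
    have hlastD : (t0 :: rest).getLastD [] = ops := by rw [hsplit]; simp
    have hops_mem : ops ∈ t0 :: rest := by rw [hsplit]; simp
    have hrs_mem : ∀ r ∈ rs, r ∈ t0 :: rest := fun r hr => by
      rw [hsplit]; exact List.mem_append_left _ hr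
    have hmB : (PySem.List.min? ((t0 :: rest).map List.length) (fun x => x)).getD 0
        = mL (t0 :: rest) := by
      simp only [List.map_cons]
      rw [min?_id_bridge, mL, List.map_cons]
    have hmors : ∀ r ∈ rs, mL (t0 :: rest) ≤ r.length :=
      fun r hr => mL_le _ r (hrs_mem r hr)
    have hmops : mL (t0 :: rest) ≤ ops.length := mL_le _ ops hops_mem
    have hlines : (t0 :: rest).length = lines.length := by
      rw [← hts', List.length_map]
    have hp' : ∀ j, j < mL (t0 :: rest) →
        (∀ r ∈ rs, PySem.Int.ofStr? (r.getD j "") ≠ none) ∧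
        (ops.getD j "" ≠ "+" → rs ≠ []) := by
      intro j hj
      have h0 := hp j hj
      rw [hdrop] at h0
      refine ⟨h0.1, fun hne hnil => ?_⟩
      have h2 := h0.2 (by rwa [hlastD])
      rw [hsplit, hnil] at hlines
      simp at hlines
      omega
    rw [pyZipStar_eq, List.foldl_map,
      foldl_stepA' (List.range (mL (t0 :: rest))) _ (fun j => gcol rs ops j) ?hcols 0]
    case hcols =>
      intro j hj t
      have hj' : j < mL (t0 :: rest) := List.mem_range.mp hj
      have hcol : (t0 :: rest).map (fun t => t.getD j "") =
          rs.map (fun r => r.getD j "") ++ [ops.getD j ""] := by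
        rw [hsplit]; simp
      rw [hcol]
      exact stepA_col rs ops j (hp' j hj').1 (hp' j hj').2 t
    rw [Option.getD_some, zero_add]
    simp only [List.isEmpty_cons, Bool.false_eq_true, if_false]
    rw [hdrop, hmB,
      foldl_stepB_some (mL (t0 :: rest)) rs ?hbp (List.replicate _ 0, List.replicate _ 1)]
    case hbp =>
      intro r hr s hs
      obtain ⟨j, hjlen, rfl⟩ := List.mem_iff_getElem.mp hs
      have hjm : j < mL (t0 :: rest) := by
        simp only [List.length_take] at hjlen; omega
      have hjr : j < r.length := by
        simp only [List.length_take] at hjlen; omega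
      rw [List.getElem_take]
      have := (hp' j hjm).1 r hr
      rwa [List.getD_eq_getElem _ _ hjr] at this
    obtain ⟨sums, prods, hsp⟩ :
        ∃ s p, rs.foldl (pstep (mL (t0 :: rest)))
          (List.replicate (mL (t0 :: rest)) 0, List.replicate (mL (t0 :: rest)) 1) = (s, p) :=
      ⟨_, _, rfl⟩
    have hlen12 := pstep_fold_len (mL (t0 :: rest)) rs
      (List.replicate (mL (t0 :: rest)) 0, List.replicate (mL (t0 :: rest)) 1)
      (by simp) (by simp) hmors
    rw [hsp] at hlen12
    rw [hsp, hlastD]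
    simp only []
    rw [zip3_eq (mL (t0 :: rest)) ops sums prods hlen12.1 hlen12.2 hmops,
      List.foldl_map, foldl_add_pick]
    refine congrArg List.sum (List.map_congr_left ?_)
    intro j hj
    have hjm := List.mem_range.mp hj
    have hg := pstep_fold_getD (mL (t0 :: rest)) rs j hjm
      (List.replicate (mL (t0 :: rest)) 0, List.replicate (mL (t0 :: rest)) 1)
      (by simp) (by simp) hmors
    rw [hsp] at hg
    rw [gcol]
    by_cases hop : ops.getD j "" = "+"
    · rw [if_pos hop, if_pos hop, hg.1]
      rw [show (List.replicate (mL (t0 :: rest)) (0:Int)).getD j 0 = 0 by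
        simp [List.getD, List.getElem?_replicate, hjm]]
      rw [foldl_add_pick]
    · rw [if_neg hop, if_neg hop, hg.2]
      rw [show (List.replicate (mL (t0 :: rest)) (1:Int)).getD j 0 = 1 by
        simp [List.getD, List.getElem?_replicate, hjm]]
      rw [List.foldl_map]

theorem part_1_spec : Claim_equal_part_1 := by
  intro lines _ hp
  unfold Spec_part_1
  exact main_eq lines hp
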